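-- pv_equiv track=rewrite | github.com/gkhayes/packet_sniffer | application.py | longest_seq
-- ===== SOURCE A (Python) =====
-- def longest_seq(block_list):
--     # Initialize variables
--     max_start = -1
--     max_end = -1
--     max_len = 0
--
--     seq_start = -1
--     seq_end = -1
--     seq_len = 0
--
--     # Find longest sequence
--     for i in range(len(block_list)):
--         block = block_list[i]
--         if block == '0':
--             if seq_len == 0:
--                 seq_start = i
--                 seq_end = i
--             else:
--                 seq_end += 1
--
--             seq_len += 1
--         else:
--             if seq_len > max_len:
--                 max_len = seq_len
--                 max_start = seq_start
--                 max_end = seq_end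
--
--             seq_len = 0
--             seq_start = -1
--             seq_end = -1
--
--     return max_len, max_start, max_end
-- ===== SOURCE B (Python) =====
-- def longest_seq(block_list):
--     # Scan run-by-run: skip to the end of each '0' run in an inner loop and
--     # record it as a candidate if strictly longer than the best so far.
--     best = (0, -1, -1)
--     i, n = 0, len(block_list)
--     while i < n:
--         if block_list[i] == '0':
--             j = i
--             while j < n and block_list[j] == '0':
--                 j += 1
--             if j - i > best[0]:
--                 best = (j - i, i, j - 1)
--             i = j
--         else:
--             i += 1
--     return best
-- ===== Notes on version B (the rewrite author's own statement) =====
-- stated objective: alternative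
-- what changed: Replaces A's per-element state machine (seq_start/seq_end/seq_len flushed on each non-'0') by a run-skipping scan that finds each maximal '0' run with an inner loop and records it as a candidate directly, which also counts a run at the end of the list.
-- intended difference: On lists whose trailing run of '0' blocks is strictly longer than every '0' run followed by a non-'0' block, A returns the best earlier run (e.g. (1,0,0) on ['0','1','0','0']) because it only records a run when a non-'0' terminates it, while B returns that trailing run ((2,2,3) there), which is the intended longest sequence. — e.g. on longest_seq(["0", "1", "0", "0"]): A returns (1, 0, 0), B returns (2, 2, 3)
import Mathlib
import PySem

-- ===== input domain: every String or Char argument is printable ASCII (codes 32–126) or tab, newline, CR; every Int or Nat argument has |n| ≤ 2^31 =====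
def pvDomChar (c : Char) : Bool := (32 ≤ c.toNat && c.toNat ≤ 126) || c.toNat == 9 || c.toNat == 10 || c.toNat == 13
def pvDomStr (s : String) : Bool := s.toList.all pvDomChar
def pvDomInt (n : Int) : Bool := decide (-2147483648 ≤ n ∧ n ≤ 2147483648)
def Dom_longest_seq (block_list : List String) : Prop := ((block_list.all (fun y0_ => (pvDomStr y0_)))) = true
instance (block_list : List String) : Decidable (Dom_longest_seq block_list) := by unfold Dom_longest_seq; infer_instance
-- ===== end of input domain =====

-- B scans run-by-run instead of keeping A's per-element seq state, and (intended
-- difference, see D_) also counts a '0' run at the very end of the list, which A drops.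

-- ===== PORT A =====
-- A's for-loop over range(len(block_list)), state (max_len,max_start,max_end,seq_start,seq_end,seq_len), index i
def aGo (l : List String) (i ml ms me ss se sl : Int) : Int × Int × Int :=
  match l with
  | [] => (ml, ms, me)
  | b :: rest =>
    if b == "0" then
      if sl == 0 then aGo rest (i+1) ml ms me i i (sl+1)
      else aGo rest (i+1) ml ms me ss (se+1) (sl+1)
    else
      if sl > ml then aGo rest (i+1) sl ss se (-1) (-1) 0
      else aGo rest (i+1) ml ms me (-1) (-1) 0

def longest_seq (block_list : List String) : Int × Int × Int :=
  aGo block_list 0 0 (-1) (-1) (-1) (-1) 0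

-- ===== PORT B =====
-- B's outer while loop; the inner `while block_list[j]=='0'` is the takeWhile/dropWhile split
def bGo (l : List String) (i : Int) (best : Int × Int × Int) : Int × Int × Int :=
  match l with
  | [] => best
  | x :: xs =>
    if x == "0" then
      let k : Int := (xs.takeWhile (fun z => z == "0")).length + 1
      let best' := if k > best.1 then (k, i, i + k - 1) else best
      bGo (xs.dropWhile (fun z => z == "0")) (i + k) best'
    else bGo xs (i + 1) best
termination_by l.length
decreasing_by
  · exact Nat.lt_succ_of_le (List.length_dropWhile_le _ _)
  · simp

def longest_seq_alt (block_list : List String) : Int × Int × Int :=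
  bGo block_list 0 (0, -1, -1)

-- ===== PRECONDITION & SPEC =====
-- On lists whose trailing '0' run is strictly longer than every '0' run followed by a
-- non-'0' block, A returns the best earlier run (it only records a run when a non-'0'
-- terminates it), while B returns that trailing run, the intended longest sequence.
def D_longest_seq (block_list : List String) : Prop :=
  let t := (block_list.reverse.takeWhile (fun z => z == "0")).length
  0 < t ∧ ¬ List.replicate t "0" <:+: block_list.take (block_list.length - t)
instance (block_list : List String) : Decidable (D_longest_seq block_list) := by
  unfold D_longest_seq; infer_instance

def Spec_longest_seq (block_list : List String) (out : Int × Int × Int) : Prop :=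
  ¬ D_longest_seq block_list → out = longest_seq_alt block_list
instance (block_list : List String) (out : Int × Int × Int) : Decidable (Spec_longest_seq block_list out) := by
  unfold Spec_longest_seq; infer_instance

def pvDiffWitness_longest_seq : List String := ["0", "1", "0", "0"]
def pvDiffWitnessOut_longest_seq : (Int × Int × Int) × (Int × Int × Int) := ((1, 0, 0), (2, 2, 3))

-- ===== CLAIM (what is proved, stated in full; the proofs are below) =====
def Claim_unchanged_longest_seq : Prop := ∀ (block_list : List String), Dom_longest_seq block_list → Spec_longest_seq block_list (longest_seq block_list)
def Claim_changed_longest_seq : Prop := Dom_longest_seq (pvDiffWitness_longest_seq) ∧ D_longest_seq (pvDiffWitness_longest_seq) ∧ longest_seq (pvDiffWitness_longest_seq) = pvDiffWitnessOut_longest_seq.1 ∧ longest_seq_alt (pvDiffWitness_longest_seq) = pvDiffWitnessOut_longest_seq.2 ∧ pvDiffWitnessOut_longest_seq.1 ≠ pvDiffWitnessOut_longest_seq.2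
def Claim_exact_longest_seq : Prop := ∀ (block_list : List String), Dom_longest_seq block_list → D_longest_seq block_list → longest_seq block_list ≠ longest_seq_alt block_list

-- ===== LEMMAS AND PROOFS =====

-- proof-side helper: max length of a '0' run that is terminated by a non-'0' block
def imz : List String → Nat → Nat
  | [], _ => 0
  | x :: xs, cur => if x == "0" then imz xs (cur + 1) else max cur (imz xs 0)

-- proof-side helper: max '0'-run length counting the trailing run too
def azr : List String → Nat → Nat
  | [], cur => cur
  | x :: xs, cur => if x == "0" then azr xs (cur + 1) else max cur (azr xs 0)

lemma tz_le (xs : List String) :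
    (xs.reverse.takeWhile (fun z => z == "0")).length ≤ xs.length := by
  calc (xs.reverse.takeWhile (fun z => z == "0")).length ≤ xs.reverse.length :=
        (List.takeWhile_sublist _).length_le
    _ = xs.length := List.length_reverse

lemma tz_cons (x : String) (xs : List String) :
    ((x :: xs).reverse.takeWhile (fun z => z == "0")).length
      = if (xs.reverse.takeWhile (fun z => z == "0")).length = xs.length
        then (if x == "0" then xs.length + 1 else xs.length)
        else (xs.reverse.takeWhile (fun z => z == "0")).length := by
  rw [List.reverse_cons, List.takeWhile_append]
  by_cases h1 : (List.takeWhile (fun z => z == "0") xs.reverse).length = xs.length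
  · rw [if_pos (by simpa using h1), if_pos h1]
    by_cases hx : (x == "0") = true <;> simp [List.takeWhile, hx]
  · rw [if_neg (by simpa using h1), if_neg h1]

lemma azr_max : ∀ (l : List String) (c : Nat),
    azr l c = max (imz l c)
      (if (l.reverse.takeWhile (fun z => z == "0")).length = l.length
       then c + l.length else (l.reverse.takeWhile (fun z => z == "0")).length) := by
  intro l
  induction l with
  | nil => intro c; simp [azr, imz]
  | cons x xs ih =>
    intro c
    rw [tz_cons]
    have htle := tz_le xs
    by_cases hx : (x == "0") = true
    · simp only [azr, imz, hx, if_true, List.length_cons]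
      rw [ih (c+1)]
      split_ifs with h1 h2 <;> omega
    · simp only [azr, imz, hx, Bool.false_eq_true, if_false, List.length_cons]
      rw [ih 0]
      split_ifs with h1 h2 <;> omega

lemma dropWhile_head_false {α : Type} (p : α → Bool) :
    ∀ (xs : List α) (y : α) (ys : List α), xs.dropWhile p = y :: ys → p y = false := by
  intro xs
  induction xs with
  | nil => intro y ys h; simp [List.dropWhile] at h
  | cons a as ih =>
    intro y ys h
    by_cases hp : p a
    · rw [List.dropWhile_cons_of_pos hp] at h; exact ih y ys h
    · rw [List.dropWhile_cons_of_neg hp] at h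
      cases h; simpa using hp

lemma aGo_zeros : ∀ (zs : List String), (∀ z ∈ zs, (z == "0") = true) →
    ∀ (rest : List String) (i ml ms me ss se : Int) (sl : Int), 1 ≤ sl →
    aGo (zs ++ rest) i ml ms me ss se sl
      = aGo rest (i + zs.length) ml ms me ss (se + zs.length) (sl + zs.length) := by
  intro zs
  induction zs with
  | nil => intro _ rest i ml ms me ss se sl _; simp
  | cons z zt ih =>
    intro hz rest i ml ms me ss se sl hsl
    have hz0 : (z == "0") = true := hz z (by simp)
    have hne : (sl == 0) = false := by rw [beq_eq_false_iff_ne]; omega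
    simp only [List.cons_append, aGo, hz0, hne, if_true, Bool.false_eq_true, if_false]
    rw [ih (fun a ha => hz a (by simp [ha])) rest (i+1) ml ms me ss (se+1) (sl+1) (by omega)]
    simp only [List.length_cons]
    congr 1 <;> push_cast <;> ring

lemma imz_zeros : ∀ (zs : List String), (∀ z ∈ zs, (z == "0") = true) →
    ∀ (rest : List String) (c : Nat), imz (zs ++ rest) c = imz rest (c + zs.length) := by
  intro zs
  induction zs with
  | nil => intro _ rest c; simp
  | cons z zt ih =>
    intro hz rest c
    have hz0 : (z == "0") = true := hz z (by simp)
    simp only [List.cons_append, imz, hz0, if_pos rfl]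
    rw [ih (fun a ha => hz a (by simp [ha])) rest (c+1)]
    simp; ring_nf

lemma azr_zeros : ∀ (zs : List String), (∀ z ∈ zs, (z == "0") = true) →
    ∀ (rest : List String) (c : Nat), azr (zs ++ rest) c = azr rest (c + zs.length) := by
  intro zs
  induction zs with
  | nil => intro _ rest c; simp
  | cons z zt ih =>
    intro hz rest c
    have hz0 : (z == "0") = true := hz z (by simp)
    simp only [List.cons_append, azr, hz0, if_pos rfl]
    rw [ih (fun a ha => hz a (by simp [ha])) rest (c+1)]
    simp; ring_nf

lemma agree : ∀ (n : Nat) (l : List String), l.length ≤ n →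
    ∀ (i : Int) (m : Nat) (ms me : Int),
    azr l 0 ≤ max m (imz l 0) →
    aGo l i (m : Int) ms me (-1) (-1) 0 = bGo l i ((m : Int), ms, me) := by
  intro n
  induction n with
  | zero =>
    intro l hl i m ms me _
    have : l = [] := List.length_eq_zero_iff.mp (Nat.le_zero.mp hl)
    subst this; simp [aGo, bGo]
  | succ n ih =>
    intro l hl i m ms me hcond
    match l with
    | [] => simp [aGo, bGo]
    | x :: xs =>
      by_cases hx : (x == "0") = true
      · have hxeq : x = "0" := by simpa using hx
        subst hxeq
        obtain ⟨pre, hpre⟩ : ∃ p, p = xs.takeWhile (fun z => z == "0") := ⟨_, rfl⟩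
        obtain ⟨rest, hrest⟩ : ∃ r, r = xs.dropWhile (fun z => z == "0") := ⟨_, rfl⟩
        have hsplit : xs = pre ++ rest := by rw [hpre, hrest]; exact (List.takeWhile_append_dropWhile).symm
        have hpre0 : ∀ z ∈ pre, (z == "0") = true := by
          intro z hz; rw [hpre] at hz; simpa using List.mem_takeWhile_imp hz
        have hall0 : ∀ z ∈ ("0" : String) :: pre, (z == "0") = true := by
          intro z hz; rw [List.mem_cons] at hz
          rcases hz with rfl | hz
          · simp
          · exact hpre0 _ hz
        obtain ⟨k, hk⟩ : ∃ kk : Nat, kk = pre.length + 1 := ⟨_, rfl⟩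
        have hA : aGo ("0" :: xs) i (m : Int) ms me (-1) (-1) 0
            = aGo rest (i + k) (m : Int) ms me i (i + (k : Int) - 1) (k : Int) := by
          simp only [aGo, beq_self_eq_true, if_true]
          norm_num
          rw [hsplit, aGo_zeros pre hpre0 rest (i+1) (m:Int) ms me i i 1 le_rfl]
          congr 1 <;> rw [hk] <;> push_cast <;> ring
        have hB : bGo ("0" :: xs) i ((m : Int), ms, me)
            = bGo rest (i + k) (if (k : Int) > (m : Int) then ((k : Int), i, i + k - 1) else ((m : Int), ms, me)) := by
          rw [bGo]
          simp only [beq_self_eq_true, if_true, ← hpre, ← hrest]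
          have e1 : ((pre.length : Nat) : Int) + 1 = (k : Int) := by rw [hk]; push_cast; ring
          rw [e1]
        have himz : imz ("0" :: xs) 0 = imz rest k := by
          have h := imz_zeros (("0":String) :: pre) hall0 rest 0
          simpa [hsplit, hk] using h
        have hazr : azr ("0" :: xs) 0 = azr rest k := by
          have h := azr_zeros (("0":String) :: pre) hall0 rest 0
          simpa [hsplit, hk] using h
        rw [hA, hB]
        match hr : rest with
        | [] =>
          have hk_le : k ≤ m := by
            simp only [himz, hazr] at hcond
            simp [imz, azr] at hcond; omega
          have hng : ¬ ((k : Int) > (m : Int)) := by push_cast; omega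
          rw [if_neg hng]
          simp [aGo, bGo]
        | y :: ys =>
          have hy : (y == "0") = false := dropWhile_head_false _ xs y ys hrest.symm
          have hlen : ys.length ≤ n := by
            have h1 : (y :: ys).length ≤ xs.length := by
              rw [hrest]; exact List.length_dropWhile_le _ _
            simp at h1 hl; omega
          have hcond' : azr ys 0 ≤ max (max m k) (imz ys 0) := by
            simp only [himz, hazr] at hcond
            simp [imz, azr, hy] at hcond
            omega
          by_cases hmk : (k : Int) > (m : Int)
          · have hmax : max m k = k := by
              have : m < k := by exact_mod_cast hmk
              omega
            rw [if_pos hmk]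
            simp only [aGo, hy, Bool.false_eq_true, if_false]
            rw [if_pos (by push_cast; omega)]
            have hrec := ih ys hlen (i + k + 1) k i (i + k - 1) (by rw [hmax] at hcond'; exact hcond')
            simp only [bGo, hy, Bool.false_eq_true, if_false]
            convert hrec using 2 <;> push_cast <;> ring
          · have hmax : max m k = m := by
              have h2 : ¬ ((m : Int) < (k : Int)) := hmk
              have h3 : k ≤ m := by omega
              omega
            rw [if_neg hmk]
            simp only [aGo, hy, Bool.false_eq_true, if_false]
            rw [if_neg (by push_cast; omega)]
            have hrec := ih ys hlen (i + k + 1) m ms me (by rw [hmax] at hcond'; exact hcond')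
            simp only [bGo, hy, Bool.false_eq_true, if_false]
            convert hrec using 2 <;> push_cast <;> ring
      · have hcond' : azr xs 0 ≤ max m (imz xs 0) := by
          simp [imz, azr, hx] at hcond; omega
        simp only [aGo, bGo, hx, Bool.false_eq_true, if_false]
        rw [if_neg (by omega)]
        exact ih xs (by simp at hl; omega) (i+1) m ms me hcond'

lemma a_fst : ∀ (n : Nat) (l : List String), l.length ≤ n →
    ∀ (i : Int) (m : Nat) (ms me : Int),
    (aGo l i (m : Int) ms me (-1) (-1) 0).1 = ((max m (imz l 0) : Nat) : Int) := by
  intro n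
  induction n with
  | zero =>
    intro l hl i m ms me
    have : l = [] := List.length_eq_zero_iff.mp (Nat.le_zero.mp hl)
    subst this; simp [aGo, imz]
  | succ n ih =>
    intro l hl i m ms me
    match l with
    | [] => simp [aGo, imz]
    | x :: xs =>
      by_cases hx : (x == "0") = true
      · have hxeq : x = "0" := by simpa using hx
        subst hxeq
        obtain ⟨pre, hpre⟩ : ∃ p, p = xs.takeWhile (fun z => z == "0") := ⟨_, rfl⟩
        obtain ⟨rest, hrest⟩ : ∃ r, r = xs.dropWhile (fun z => z == "0") := ⟨_, rfl⟩
        have hsplit : xs = pre ++ rest := by rw [hpre, hrest]; exact (List.takeWhile_append_dropWhile).symm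
        have hpre0 : ∀ z ∈ pre, (z == "0") = true := by
          intro z hz; rw [hpre] at hz; simpa using List.mem_takeWhile_imp hz
        have hall0 : ∀ z ∈ ("0" : String) :: pre, (z == "0") = true := by
          intro z hz; rw [List.mem_cons] at hz
          rcases hz with rfl | hz
          · simp
          · exact hpre0 _ hz
        obtain ⟨k, hk⟩ : ∃ kk : Nat, kk = pre.length + 1 := ⟨_, rfl⟩
        have hA : aGo ("0" :: xs) i (m : Int) ms me (-1) (-1) 0
            = aGo rest (i + k) (m : Int) ms me i (i + (k : Int) - 1) (k : Int) := by
          simp only [aGo, beq_self_eq_true, if_true]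
          norm_num
          rw [hsplit, aGo_zeros pre hpre0 rest (i+1) (m:Int) ms me i i 1 le_rfl]
          congr 1 <;> rw [hk] <;> push_cast <;> ring
        have himz : imz ("0" :: xs) 0 = imz rest k := by
          have h := imz_zeros (("0":String) :: pre) hall0 rest 0
          simpa [hsplit, hk] using h
        rw [hA, himz]
        match hr : rest with
        | [] => simp [aGo, imz]
        | y :: ys =>
          have hy : (y == "0") = false := dropWhile_head_false _ xs y ys hrest.symm
          have hlen : ys.length ≤ n := by
            have h1 : (y :: ys).length ≤ xs.length := by
              rw [hrest]; exact List.length_dropWhile_le _ _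
            simp at h1 hl; omega
          simp only [aGo, hy, Bool.false_eq_true, if_false, imz]
          by_cases hmk : (k : Int) > (m : Int)
          · rw [if_pos (by push_cast; omega)]
            rw [ih ys hlen (i + k + 1) k i (i + k - 1)]
            congr 1
            have h2 : m < k := by exact_mod_cast hmk
            omega
          · rw [if_neg (by push_cast; omega)]
            rw [ih ys hlen (i + k + 1) m ms me]
            congr 1
            have h2 : ¬ ((m : Int) < (k : Int)) := hmk
            have h3 : k ≤ m := by omega
            omega
      · simp only [aGo, hx, Bool.false_eq_true, if_false]
        rw [if_neg (by omega)]
        rw [ih xs (by simp at hl; omega) (i+1) m ms me]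
        congr 1
        simp [imz, hx]

lemma b_fst : ∀ (n : Nat) (l : List String), l.length ≤ n →
    ∀ (i : Int) (m : Nat) (ms me : Int),
    (bGo l i ((m : Int), ms, me)).1 = ((max m (azr l 0) : Nat) : Int) := by
  intro n
  induction n with
  | zero =>
    intro l hl i m ms me
    have : l = [] := List.length_eq_zero_iff.mp (Nat.le_zero.mp hl)
    subst this; simp [bGo, azr]
  | succ n ih =>
    intro l hl i m ms me
    match l with
    | [] => simp [bGo, azr]
    | x :: xs =>
      by_cases hx : (x == "0") = true
      · have hxeq : x = "0" := by simpa using hx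
        subst hxeq
        obtain ⟨pre, hpre⟩ : ∃ p, p = xs.takeWhile (fun z => z == "0") := ⟨_, rfl⟩
        obtain ⟨rest, hrest⟩ : ∃ r, r = xs.dropWhile (fun z => z == "0") := ⟨_, rfl⟩
        have hsplit : xs = pre ++ rest := by rw [hpre, hrest]; exact (List.takeWhile_append_dropWhile).symm
        have hall0 : ∀ z ∈ ("0" : String) :: pre, (z == "0") = true := by
          intro z hz; rw [List.mem_cons] at hz
          rcases hz with rfl | hz
          · simp
          · rw [hpre] at hz; simpa using List.mem_takeWhile_imp hz
        obtain ⟨k, hk⟩ : ∃ kk : Nat, kk = pre.length + 1 := ⟨_, rfl⟩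
        have hB : bGo ("0" :: xs) i ((m : Int), ms, me)
            = bGo rest (i + k) (if (k : Int) > (m : Int) then ((k : Int), i, i + k - 1) else ((m : Int), ms, me)) := by
          rw [bGo]
          simp only [beq_self_eq_true, if_true, ← hpre, ← hrest]
          have e1 : ((pre.length : Nat) : Int) + 1 = (k : Int) := by rw [hk]; push_cast; ring
          rw [e1]
        have hazr : azr ("0" :: xs) 0 = azr rest k := by
          have h := azr_zeros (("0":String) :: pre) hall0 rest 0
          simpa [hsplit, hk] using h
        rw [hB, hazr]
        have hlen : rest.length ≤ n := by
          have h1 : rest.length ≤ xs.length := by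
            rw [hrest]; exact List.length_dropWhile_le _ _
          simp at hl; omega
        by_cases hmk : (k : Int) > (m : Int)
        · rw [if_pos hmk]
          rw [ih rest hlen (i + k) k i (i + k - 1)]
          congr 1
          have h2 : m < k := by exact_mod_cast hmk
          match hr : rest with
          | [] => simp [azr]; omega
          | y :: ys =>
            have hy : (y == "0") = false := dropWhile_head_false _ xs y ys hrest.symm
            simp [azr, hy]
            omega
        · rw [if_neg hmk]
          rw [ih rest hlen (i + k) m ms me]
          congr 1
          have h2 : ¬ ((m : Int) < (k : Int)) := hmk
          have h3 : k ≤ m := by omega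
          match hr : rest with
          | [] => simp [azr]; omega
          | y :: ys =>
            have hy : (y == "0") = false := dropWhile_head_false _ xs y ys hrest.symm
            simp [azr, hy]
            omega
      · simp only [bGo, hx, Bool.false_eq_true, if_false]
        rw [ih xs (by simp at hl; omega) (i+1) m ms me]
        congr 1
        simp [azr, hx]

lemma azr_G : ∀ (l : List String) (c : Nat),
    azr l c = max (c + (l.takeWhile (fun z => z == "0")).length)
                  (azr (l.dropWhile (fun z => z == "0")) 0) := by
  intro l
  induction l with
  | nil => intro c; simp [azr]
  | cons x xs ih =>
    intro c
    by_cases hx : (x == "0") = true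
    · simp only [azr, hx, if_true, List.takeWhile_cons, List.dropWhile_cons, List.length_cons]
      rw [ih (c+1)]
      omega
    · simp only [azr, hx, Bool.false_eq_true, if_false, List.takeWhile_cons, List.dropWhile_cons,
        List.length_nil]
      omega

lemma azr_cons (x : String) (xs : List String) :
    azr (x :: xs) 0 = max ((x :: xs).takeWhile (fun z => z == "0")).length (azr xs 0) := by
  by_cases hx : (x == "0") = true
  · simp only [azr, hx, if_true, List.takeWhile_cons, List.length_cons]
    rw [azr_G xs 1, azr_G xs 0]
    omega
  · simp [azr, List.takeWhile_cons, hx]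

lemma rep_prefix_iff : ∀ (l : List String) (k : Nat),
    (List.replicate k "0" <+: l ↔ k ≤ (l.takeWhile (fun z => z == "0")).length) := by
  intro l
  induction l with
  | nil =>
    intro k
    simp only [List.prefix_nil, List.takeWhile_nil, List.length_nil, Nat.le_zero,
      List.replicate_eq_nil_iff]
  | cons x xs ih =>
    intro k
    match k with
    | 0 => simp
    | k + 1 =>
      rw [List.replicate_succ]
      constructor
      · intro h
        have hx : x = "0" := ((List.cons_prefix_cons.mp h).1).symm
        have ht : List.replicate k "0" <+: xs := (List.cons_prefix_cons.mp h).2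
        simp [List.takeWhile_cons, hx]
        exact (ih k).mp ht
      · intro h
        by_cases hx : (x == "0") = true
        · have hxeq : x = "0" := by simpa using hx
          simp [List.takeWhile_cons, hx] at h
          exact List.cons_prefix_cons.mpr ⟨hxeq.symm, (ih k).mpr (by omega)⟩
        · simp [List.takeWhile_cons, hx] at h
lemma rep_infix_iff : ∀ (l : List String) (k : Nat), 0 < k →
    (List.replicate k "0" <:+: l ↔ k ≤ azr l 0) := by
  intro l
  induction l with
  | nil =>
    intro k hk
    simp only [List.infix_nil, List.replicate_eq_nil_iff, azr]
    omega
  | cons x xs ih =>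
    intro k hk
    rw [List.infix_cons_iff, rep_prefix_iff, ih k hk, azr_cons]
    omega

lemma tz_all (l : List String)
    (h : (l.reverse.takeWhile (fun z => z == "0")).length = l.length) :
    ∀ z ∈ l, (z == "0") = true := by
  have hpref : l.reverse.takeWhile (fun z => z == "0") <+: l.reverse := List.takeWhile_prefix _
  have heq : l.reverse.takeWhile (fun z => z == "0") = l.reverse :=
    List.IsPrefix.eq_of_length hpref (by simpa using h)
  intro z hz
  have hz' : z ∈ l.reverse := by simpa using hz
  rw [← heq] at hz'
  simpa using List.mem_takeWhile_imp (p := fun z => z == "0") hz'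

lemma imz_zeros' (zs : List String) (h : ∀ z ∈ zs, (z == "0") = true) (c : Nat) :
    imz zs c = 0 := by
  have := imz_zeros zs h [] c
  simpa using this
lemma azr_take : ∀ (l : List String),
    (l.reverse.takeWhile (fun z => z == "0")).length < l.length →
    ∀ (c : Nat),
    azr (l.take (l.length - (l.reverse.takeWhile (fun z => z == "0")).length)) c = imz l c := by
  intro l
  induction l with
  | nil => intro h; simp at h
  | cons x xs ih =>
    intro h c
    rw [tz_cons] at h ⊢
    by_cases h1 : (xs.reverse.takeWhile (fun z => z == "0")).length = xs.length
    · rw [if_pos h1] at h ⊢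
      by_cases hx : (x == "0") = true
      · rw [if_pos hx] at h; simp at h
      · rw [if_neg (by simpa using hx)] at h ⊢
        have ht : (x :: xs).length - xs.length = 1 := by simp
        rw [ht]
        simp only [List.take_succ_cons, List.take_zero]
        have hz := imz_zeros' xs (tz_all xs h1) 0
        simp [azr, imz, hx, hz]
    · rw [if_neg h1] at h ⊢
      have hlt : (xs.reverse.takeWhile (fun z => z == "0")).length < xs.length := by
        have := tz_le xs; omega
      have ht : (x :: xs).length - (xs.reverse.takeWhile (fun z => z == "0")).length
          = (xs.length - (xs.reverse.takeWhile (fun z => z == "0")).length) + 1 := by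
        simp only [List.length_cons]; omega
      rw [ht, List.take_succ_cons]
      by_cases hx : (x == "0") = true
      · simp only [azr, imz, hx, if_true]
        exact ih hlt (c+1)
      · simp only [azr, imz, hx, Bool.false_eq_true, if_false]
        rw [ih hlt 0]

lemma D_bridge (l : List String) :
    ((0 < (l.reverse.takeWhile (fun z => z == "0")).length ∧
      ¬ List.replicate (l.reverse.takeWhile (fun z => z == "0")).length "0"
          <:+: l.take (l.length - (l.reverse.takeWhile (fun z => z == "0")).length))
     ↔ imz l 0 < (l.reverse.takeWhile (fun z => z == "0")).length) := by
  by_cases h0 : (l.reverse.takeWhile (fun z => z == "0")).length = 0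
  · rw [h0]; simp
  · have hpos : 0 < (l.reverse.takeWhile (fun z => z == "0")).length := by omega
    by_cases h1 : (l.reverse.takeWhile (fun z => z == "0")).length = l.length
    · -- all zeros
      have hz := imz_zeros' l (tz_all l h1) 0
      rw [hz]
      have ht : l.length - (l.reverse.takeWhile (fun z => z == "0")).length = 0 := by omega
      rw [ht]
      simp only [List.take_zero, List.infix_nil, List.replicate_eq_nil_iff]
      constructor
      · intro _; omega
      · intro _; exact ⟨hpos, by omega⟩
    · have hlt : (l.reverse.takeWhile (fun z => z == "0")).length < l.length := by
        have := tz_le l; omega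
      rw [rep_infix_iff _ _ hpos, azr_take l hlt 0]
      omega

-- ===== VERDICT (by name: the statement is the Claim_ definition above) =====
theorem longest_seq_spec : Claim_unchanged_longest_seq := by
  intro l _
  unfold Spec_longest_seq
  intro hnd
  have hnd' : ¬ (imz l 0 < (l.reverse.takeWhile (fun z => z == "0")).length) := by
    rw [← D_bridge l]; exact hnd
  unfold longest_seq longest_seq_alt
  have hc : azr l 0 ≤ max 0 (imz l 0) := by
    have h := azr_max l 0
    have htle := tz_le l
    rw [h]; split_ifs at h ⊢ <;> omega
  have h := agree l.length l (le_refl _) 0 0 (-1) (-1) hc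
  simpa using h

theorem longest_seq_changed : Claim_changed_longest_seq := by
  unfold Claim_changed_longest_seq
  refine ⟨by decide, by decide, ?_, ?_, by decide⟩
  · rfl
  · show longest_seq_alt ["0", "1", "0", "0"] = (2, 2, 3)
    unfold longest_seq_alt
    rw [bGo.eq_def]; simp [List.takeWhile, List.dropWhile]
    rw [bGo.eq_def]; simp
    rw [bGo.eq_def]; simp [List.takeWhile, List.dropWhile]
    rw [bGo.eq_def]

theorem longest_seq_tight : Claim_exact_longest_seq := by
  intro l _ hd
  have hd' : imz l 0 < (l.reverse.takeWhile (fun z => z == "0")).length := by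
    rw [← D_bridge l]; exact hd
  unfold longest_seq longest_seq_alt
  intro heq
  have ha := a_fst l.length l (le_refl _) 0 0 (-1) (-1)
  have hb := b_fst l.length l (le_refl _) 0 0 (-1) (-1)
  have hfst : (aGo l 0 ((0:Nat):Int) (-1) (-1) (-1) (-1) 0).1 = (bGo l 0 (((0:Nat):Int), -1, -1)).1 := by
    simp only [Nat.cast_zero]
    rw [heq]
  rw [ha, hb] at hfst
  have h1 : max 0 (imz l 0) = imz l 0 := by omega
  have h2 : max 0 (azr l 0) = azr l 0 := by omega
  rw [h1, h2] at hfst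
  have h3 : imz l 0 = azr l 0 := by exact_mod_cast hfst
  have h4 := azr_max l 0
  have htle := tz_le l
  rw [h3, h4] at hd'
  split_ifs at h4 <;> omega
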